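-- pv_equiv track=rewrite | github.com/brenbrenbrenbren/volcano-tool | core/analysis.py | compute_overlaps
-- ===== SOURCE A (Python) =====
-- from typing import Dict, List, Set, Tuple, Optional
-- from itertools import combinations
--
-- def compute_overlaps(
--
--     deg_sets: Dict[str, Set[str]]
-- ) -> Dict[Tuple[str, ...], Set[str]]:
--     """
--     Compute all possible overlaps between DEG sets.
--
--     Args:
--         deg_sets: Dictionary of dataset names to gene sets
--
--     Returns:
--         Dictionary mapping set combinations to overlapping genes
--     """
--     dataset_names = list(deg_sets.keys())
--     overlaps = {}
--
--     # All possible combinations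
--     for r in range(1, len(dataset_names) + 1):
--         for combo in combinations(dataset_names, r):
--             # Genes in ALL sets of this combination
--             intersection = set.intersection(*[deg_sets[name] for name in combo])
--             # Genes NOT in other sets
--             other_sets = [deg_sets[name] for name in dataset_names if name not in combo]
--             if other_sets:
--                 exclusive = intersection - set.union(*other_sets)
--             else:
--                 exclusive = intersection
--             overlaps[combo] = exclusive
--
--     return overlaps
-- ===== SOURCE B (Python) =====
-- from itertools import combinations
--
--
-- def compute_overlaps(deg_sets):
--     names = list(deg_sets.keys())
--     items = [(n, deg_sets[n]) for n in names]
--     # One pass over all genes: bucket each gene by its exact membership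
--     # signature (the tuple of datasets, in key order, that contain it).
--     buckets = {}
--     seen = set()
--     for name, genes in items:
--         for gene in genes:
--             if gene in seen:
--                 continue
--             seen.add(gene)
--             sig = tuple(n for n, s in items if gene in s)
--             buckets.setdefault(sig, set()).add(gene)
--     # Fill every combination from its bucket (empty set if no gene has
--     # exactly that signature).
--     overlaps = {}
--     for r in range(1, len(names) + 1):
--         for combo in combinations(names, r):
--             overlaps[combo] = buckets.get(combo, set())
--     return overlaps
-- ===== Notes on version B (the rewrite author's own statement) =====
-- stated objective: faster
-- what changed: Instead of recomputing an intersection and a union of whole gene sets for every one of the 2^n dataset combinations, B makes one pass over the genes, buckets each gene by its exact dataset-membership signature, and fills each combination from its bucket.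
import Mathlib
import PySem

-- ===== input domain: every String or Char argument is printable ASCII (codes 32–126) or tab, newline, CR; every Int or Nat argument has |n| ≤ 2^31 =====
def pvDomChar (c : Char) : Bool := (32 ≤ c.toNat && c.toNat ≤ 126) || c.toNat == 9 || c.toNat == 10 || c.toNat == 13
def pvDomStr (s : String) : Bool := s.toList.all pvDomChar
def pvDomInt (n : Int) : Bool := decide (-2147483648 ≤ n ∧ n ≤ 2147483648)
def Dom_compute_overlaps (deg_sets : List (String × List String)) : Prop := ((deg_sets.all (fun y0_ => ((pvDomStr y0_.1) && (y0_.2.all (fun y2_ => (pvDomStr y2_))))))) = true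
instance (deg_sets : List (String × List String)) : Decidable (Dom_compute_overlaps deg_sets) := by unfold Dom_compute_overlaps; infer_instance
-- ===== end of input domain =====

-- B replaces A's per-combination intersection/union set algebra (recomputed for each of the
-- 2^n dataset combinations) by a single pass that buckets every gene under its exact
-- dataset-membership signature; each combination is then filled from its bucket (objective: faster).

-- ===== PORT A =====
-- itertools.combinations(xs, r): the r-element subsequences of xs, in itertools' order
def pyCombinations {α : Type} : Nat → List α → List (List α)
  | 0, _ => [[]]
  | _ + 1, [] => []
  | r + 1, x :: xs => ((pyCombinations r xs).map (fun c => x :: c)) ++ pyCombinations (r + 1) xs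

-- Port of A.  'overlaps[combo] = exclusive' always hits a FRESH key (the combinations of the
-- Nodup key list are pairwise distinct), so the result dict is built by appending its items.
-- The gene sets (Python 'set' values) are PySem.Set.ofList of the given element lists.
def compute_overlaps (deg_sets : List (String × List String)) : List (List String × List String) :=
  let d : PySem.Dict String (List String) := PySem.Dict.ofList deg_sets
  let dataset_names : List String := d.keys
  (PySem.List.pyRange 1 ((dataset_names.length : Int) + 1) 1).foldl (fun overlaps r =>
    (pyCombinations r.toNat dataset_names).foldl (fun overlaps combo =>
      let intersection : PySem.Set String :=
        match combo.map (fun name => PySem.Set.ofList (d.getD name [])) with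
        | [] => []          -- unreachable: r ≥ 1, so every combo is nonempty
        | s :: rest => rest.foldl (fun a b => PySem.Set.inter a b) s
      let exclusive : PySem.Set String :=
        match (dataset_names.filter (fun name => decide (name ∉ combo))).map
            (fun name => PySem.Set.ofList (d.getD name [])) with
        | [] => intersection
        | s :: rest => PySem.Set.diff intersection (rest.foldl (fun a b => PySem.Set.union a b) s)
      overlaps ++ [(combo, exclusive)]) overlaps) []

-- ===== PORT B =====
-- Port of B (Source B).  'buckets.setdefault(sig, set()).add(gene)' is exactly
-- d[sig] = d.get(sig, set()) plus gene: PySem.Dict.modify.  The final dict is again built by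
-- appending items (every combo key is fresh).
def compute_overlaps_alt (deg_sets : List (String × List String)) : List (List String × List String) :=
  let d : PySem.Dict String (List String) := PySem.Dict.ofList deg_sets
  let names : List String := d.keys
  let st : PySem.Dict (List String) (PySem.Set String) × PySem.Set String :=
    names.foldl (fun st name =>
      (PySem.Set.ofList (d.getD name [])).foldl (fun st gene =>
        if PySem.Set.contains st.2 gene then st
        else
          (st.1.modify (names.filter (fun n => PySem.Set.contains (PySem.Set.ofList (d.getD n [])) gene))
             PySem.Set.empty (fun s => PySem.Set.add s gene),
           PySem.Set.add st.2 gene)) st)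
      (PySem.Dict.empty, PySem.Set.empty)
  let buckets : PySem.Dict (List String) (PySem.Set String) := st.1
  (PySem.List.pyRange 1 ((names.length : Int) + 1) 1).foldl (fun overlaps r =>
    (pyCombinations r.toNat names).foldl (fun overlaps combo =>
      overlaps ++ [(combo, buckets.getD combo PySem.Set.empty)]) overlaps) []

-- ===== PRECONDITION & SPEC =====
def Spec_compute_overlaps (deg_sets : List (String × List String)) (out : List (List String × List String)) : Prop := out = compute_overlaps_alt deg_sets
instance (deg_sets : List (String × List String)) (out : List (List String × List String)) : Decidable (Spec_compute_overlaps deg_sets out) := by unfold Spec_compute_overlaps; infer_instance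

-- ===== CLAIM (what is proved, stated in full; the proofs are below) =====
def Claim_equal_compute_overlaps : Prop := ∀ (deg_sets : List (String × List String)), Dom_compute_overlaps deg_sets → Spec_compute_overlaps deg_sets (compute_overlaps deg_sets)

-- ===== LEMMAS AND PROOFS =====

-- members of pyCombinations r l are r-element subsequences of l
lemma mem_pyCombinations {α : Type} : ∀ (r : Nat) (l : List α) (c : List α),
    c ∈ pyCombinations r l → c.Sublist l ∧ c.length = r := by
  intro r l
  induction l generalizing r with
  | nil =>
    intro c hc
    cases r with
    | zero => simp [pyCombinations] at hc; subst hc; exact ⟨List.Sublist.refl _, rfl⟩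
    | succ r => simp [pyCombinations] at hc
  | cons x xs ih =>
    intro c hc
    cases r with
    | zero => simp [pyCombinations] at hc; subst hc; exact ⟨List.nil_sublist _, rfl⟩
    | succ r =>
      simp only [pyCombinations, List.mem_append, List.mem_map] at hc
      rcases hc with ⟨c', hc', rfl⟩ | hc
      · obtain ⟨hs, hl⟩ := ih r c' hc'
        exact ⟨List.Sublist.cons₂ _ hs, by simp [hl]⟩
      · obtain ⟨hs, hl⟩ := ih (r + 1) c hc
        exact ⟨hs.cons _, hl⟩

-- a cons sublist splits the big list at an occurrence of its head
lemma cons_sublist_split {α : Type} {a : α} : ∀ {cs l : List α}, (a :: cs).Sublist l →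
    ∃ pre post, l = pre ++ a :: post ∧ cs.Sublist post := by
  intro cs l
  induction l with
  | nil => intro h; exact absurd h (by simp)
  | cons x l ih =>
    intro h
    cases h with
    | cons _ h' =>
      obtain ⟨pre, post, rfl, hcs⟩ := ih h'
      exact ⟨x :: pre, post, rfl, hcs⟩
    | cons₂ _ h' => exact ⟨[], l, rfl, h'⟩

-- filtering a Nodup list by membership in one of its sublists recovers the sublist
lemma filter_mem_sublist {α : Type} [DecidableEq α] : ∀ {combo names : List α},
    combo.Sublist names → names.Nodup →
    names.filter (fun n => decide (n ∈ combo)) = combo := by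
  intro combo names hs
  induction hs with
  | slnil => intro _; rfl
  | @cons l₁ l₂ a hs ih =>
    intro hnd
    have ha : a ∉ l₂ := (List.nodup_cons.mp hnd).1
    have ha1 : a ∉ l₁ := fun h => ha (hs.subset h)
    rw [List.filter_cons_of_neg (by simpa using ha1)]
    exact ih (List.nodup_cons.mp hnd).2
  | @cons₂ l₁ l₂ a hs ih =>
    intro hnd
    have ha : a ∉ l₂ := (List.nodup_cons.mp hnd).1
    rw [List.filter_cons_of_pos (by simp)]
    congr 1
    have hcongr : List.filter (fun n => decide (n ∈ a :: l₁)) l₂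
        = List.filter (fun n => decide (n ∈ l₁)) l₂ :=
      List.filter_congr (fun n hn => by
        have hna : n ≠ a := fun h => ha (h ▸ hn)
        simp [List.mem_cons, hna])
    rw [hcongr]
    exact ih (List.nodup_cons.mp hnd).2

-- folding set.intersection over a list of sets filters the start set
lemma foldl_inter_eq_filter : ∀ (rest : List (PySem.Set String)) (s : PySem.Set String),
    rest.foldl (fun a b => PySem.Set.inter a b) s
      = s.filter (fun g => rest.all (fun t => PySem.Set.contains t g)) := by
  intro rest
  induction rest with
  | nil => intro s; simp
  | cons t rest ih =>
    intro s
    rw [List.foldl_cons, ih]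
    show (PySem.Set.inter s t).filter _ = _
    rw [show PySem.Set.inter s t = s.filter (fun x => PySem.Set.contains t x) from rfl,
      List.filter_filter]
    apply List.filter_congr
    intro g _
    simp [Bool.and_comm]

-- membership in a fold of set.union
lemma mem_foldl_union (g : String) : ∀ (rest : List (PySem.Set String)) (s : PySem.Set String),
    g ∈ rest.foldl (fun a b => PySem.Set.union a b) s ↔ g ∈ s ∨ ∃ t ∈ rest, g ∈ t := by
  intro rest
  induction rest with
  | nil => intro s; simp
  | cons t rest ih =>
    intro s
    rw [List.foldl_cons, ih, PySem.Set.mem_union]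
    simp only [List.mem_cons]
    constructor
    · rintro ((h | h) | ⟨u, hu, hgu⟩)
      · exact Or.inl h
      · exact Or.inr ⟨t, Or.inl rfl, h⟩
      · exact Or.inr ⟨u, Or.inr hu, hgu⟩
    · rintro (h | ⟨u, (rfl | hu), hgu⟩)
      · exact Or.inl (Or.inl h)
      · exact Or.inl (Or.inr hgu)
      · exact Or.inr ⟨u, hu, hgu⟩

-- B's bucket-filling step, abstracted over the signature function
def bstep (sig : String → List String)
    (st : PySem.Dict (List String) (PySem.Set String) × PySem.Set String) (gene : String) :
    PySem.Dict (List String) (PySem.Set String) × PySem.Set String :=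
  if PySem.Set.contains st.2 gene then st
  else
    (st.1.modify (sig gene) PySem.Set.empty (fun s => PySem.Set.add s gene),
     PySem.Set.add st.2 gene)

def bucketsFold (sig : String → List String) (l : List String)
    (st : PySem.Dict (List String) (PySem.Set String) × PySem.Set String) :
    PySem.Dict (List String) (PySem.Set String) × PySem.Set String :=
  l.foldl (bstep sig) st

-- invariant of B's one pass: bucket c holds, in first-seen order, the seen genes of signature c
lemma bucketsFold_spec (sig : String → List String) :
    ∀ (l : List String) (b : PySem.Dict (List String) (PySem.Set String)) (seen : PySem.Set String),
    (∀ c, b.getD c PySem.Set.empty = seen.filter (fun g => sig g == c)) →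
    (bucketsFold sig l (b, seen)).2 = PySem.Set.update seen l ∧
    ∀ c, (bucketsFold sig l (b, seen)).1.getD c PySem.Set.empty
          = (PySem.Set.update seen l).filter (fun g => sig g == c) := by
  intro l
  induction l with
  | nil =>
    intro b seen h
    exact ⟨rfl, h⟩
  | cons gene l ih =>
    intro b seen h
    by_cases hg : gene ∈ seen
    · have hstep : bucketsFold sig (gene :: l) (b, seen) = bucketsFold sig l (b, seen) := by
        simp [bucketsFold, bstep, hg]
      have hupd : PySem.Set.update seen (gene :: l) = PySem.Set.update seen l := by
        rw [PySem.Set.update_cons, PySem.Set.add_of_mem hg]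
      rw [hstep, hupd]
      exact ih b seen h
    · have hadd : PySem.Set.add seen gene = seen ++ [gene] := PySem.Set.add_of_not_mem hg
      have hstep : bucketsFold sig (gene :: l) (b, seen)
          = bucketsFold sig l
              (b.modify (sig gene) PySem.Set.empty (fun s => PySem.Set.add s gene),
               seen ++ [gene]) := by
        simp [bucketsFold, bstep, hg]
      have h' : ∀ c, (b.modify (sig gene) PySem.Set.empty (fun s => PySem.Set.add s gene)).getD c PySem.Set.empty
          = (seen ++ [gene]).filter (fun g => sig g == c) := by
        intro c
        by_cases hcs : c = sig gene
        · subst hcs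
          rw [PySem.Dict.getD_modify_self, h]
          have hnm : gene ∉ seen.filter (fun g => sig g == sig gene) :=
            fun hmem => hg (List.mem_of_mem_filter hmem)
          rw [PySem.Set.add_of_not_mem hnm, List.filter_append]
          simp
        · rw [PySem.Dict.getD_modify_of_ne _ _ _ hcs, h, List.filter_append]
          have hne : (sig gene == c) = false := by
            simp only [beq_eq_false_iff_ne, ne_eq]
            exact fun hh => hcs hh.symm
          simp [hne]
      have hupd : PySem.Set.update seen (gene :: l) = PySem.Set.update (seen ++ [gene]) l := by
        rw [PySem.Set.update_cons, hadd]
      rw [hstep, hupd]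
      exact ih _ _ h'

-- ofList of a flatMap, filtered by a predicate whose holders live only in the c0 segment
lemma ofList_flatMap_filter (f : String → PySem.Set String) (q : String → Bool)
    (pre post : List String) (c0 : String)
    (hf : (f c0).Nodup)
    (hpre : ∀ g, q g = true → ∀ n ∈ pre, g ∉ f n)
    (hc0 : ∀ g, q g = true → g ∈ f c0) :
    (PySem.Set.ofList ((pre ++ c0 :: post).flatMap f)).filter q = (f c0).filter q := by
  rw [List.flatMap_append, List.flatMap_cons]
  rw [PySem.Set.ofList_append, PySem.Set.update_eq_append_filter, List.filter_append]
  have h1 : (PySem.Set.ofList (pre.flatMap f)).filter q = [] := by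
    rw [List.filter_eq_nil_iff]
    intro g hg hq
    have hmem : g ∈ pre.flatMap f := (PySem.Set.mem_ofList _ _).mp hg
    obtain ⟨n, hn, hgn⟩ := List.mem_flatMap.mp hmem
    exact hpre g hq n hn hgn
  rw [h1, List.nil_append, List.filter_filter]
  have h2 : (PySem.Set.ofList (f c0 ++ post.flatMap f)).filter
        (fun a => q a && !(PySem.Set.ofList (pre.flatMap f)).contains a)
      = (PySem.Set.ofList (f c0 ++ post.flatMap f)).filter q := by
    apply List.filter_congr
    intro a _
    by_cases hq : q a = true
    · have hnp : a ∉ pre.flatMap f := by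
        intro hmem
        obtain ⟨n, hn, h'⟩ := List.mem_flatMap.mp hmem
        exact hpre a hq n hn h'
      have hns : a ∉ PySem.Set.ofList (pre.flatMap f) := fun hh => hnp ((PySem.Set.mem_ofList _ _).mp hh)
      simp [hq, List.contains_eq_mem, hns]
    · simp only [Bool.not_eq_true] at hq
      simp [hq]
  rw [h2]
  rw [PySem.Set.ofList_append, PySem.Set.update_eq_append_filter, List.filter_append]
  have hself : PySem.Set.ofList (f c0) = f c0 := by
    first
    | exact PySem.Set.ofList_eq_self_of_nodup hf
    | exact PySem.Set.ofList_eq_self_of_nodup _ hf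
  rw [hself]
  have h3 : ((PySem.Set.ofList (post.flatMap f)).filter (fun y => !(f c0 : PySem.Set String).contains y)).filter q = [] := by
    rw [List.filter_eq_nil_iff]
    intro g hg hq
    have h4 := List.of_mem_filter hg
    have h5 : g ∈ f c0 := hc0 g hq
    rw [Bool.not_eq_eq_eq_not, Bool.not_true, (PySem.Set.contains_iff _ _).mpr h5] at h4
    exact absurd h4 (by decide)
  rw [h3, List.append_nil]

-- the per-combo values of the two ports agree
lemma combo_value_eq (d : PySem.Dict String (List String)) (hnd : d.keys.Nodup)
    (c0 : String) (cs : List String) (hsub : (c0 :: cs).Sublist d.keys) :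
    (let intersection : PySem.Set String :=
        match (c0 :: cs).map (fun name => PySem.Set.ofList (d.getD name [])) with
        | [] => []
        | s :: rest => rest.foldl (fun a b => PySem.Set.inter a b) s
     let exclusive : PySem.Set String :=
        match (d.keys.filter (fun name => decide (name ∉ c0 :: cs))).map
            (fun name => PySem.Set.ofList (d.getD name [])) with
        | [] => intersection
        | s :: rest => PySem.Set.diff intersection (rest.foldl (fun a b => PySem.Set.union a b) s)
     exclusive)
    = ((d.keys.foldl (fun st name =>
          (PySem.Set.ofList (d.getD name [])).foldl (fun st gene =>
            if PySem.Set.contains st.2 gene then st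
            else
              (st.1.modify (d.keys.filter (fun n => PySem.Set.contains (PySem.Set.ofList (d.getD n [])) gene))
                 PySem.Set.empty (fun s => PySem.Set.add s gene),
               PySem.Set.add st.2 gene)) st)
          (PySem.Dict.empty, PySem.Set.empty)).1).getD (c0 :: cs) PySem.Set.empty := by
  have hmemS : ∀ (n g : String),
      PySem.Set.contains (PySem.Set.ofList (d.getD n [])) g = true ↔ g ∈ PySem.Set.ofList (d.getD n []) := by
    intro n g
    simp
  -- the two directions of "signature = combo"
  have dir2 : ∀ g : String,
      d.keys.filter (fun n => PySem.Set.contains (PySem.Set.ofList (d.getD n [])) g) = c0 :: cs →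
      (∀ n ∈ c0 :: cs, g ∈ PySem.Set.ofList (d.getD n [])) ∧
      (∀ n ∈ d.keys, n ∉ c0 :: cs → g ∉ PySem.Set.ofList (d.getD n [])) := by
    intro g hsg
    refine ⟨?_, ?_⟩
    · intro n hn
      rw [← hsg] at hn
      exact (hmemS n g).mp (List.mem_filter.mp hn).2
    · intro n hn hnc hgn
      have hmem : n ∈ d.keys.filter (fun n => PySem.Set.contains (PySem.Set.ofList (d.getD n [])) g) :=
        List.mem_filter.mpr ⟨hn, (hmemS n g).mpr hgn⟩
      rw [hsg] at hmem
      exact hnc hmem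
  have dir1 : ∀ g : String,
      (∀ n ∈ c0 :: cs, g ∈ PySem.Set.ofList (d.getD n [])) →
      (∀ n ∈ d.keys, n ∉ c0 :: cs → g ∉ PySem.Set.ofList (d.getD n [])) →
      d.keys.filter (fun n => PySem.Set.contains (PySem.Set.ofList (d.getD n [])) g) = c0 :: cs := by
    intro g h1 h2
    have he : d.keys.filter (fun n => PySem.Set.contains (PySem.Set.ofList (d.getD n [])) g)
        = d.keys.filter (fun n => decide (n ∈ c0 :: cs)) := by
      apply List.filter_congr
      intro n hn
      by_cases hm : n ∈ c0 :: cs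
      · have hx : g ∈ d.getD n [] := (PySem.Set.mem_ofList _ _).mp (h1 n hm)
        simp [hm, hx]
      · have hx : g ∉ d.getD n [] :=
          fun hh => h2 n hn hm ((PySem.Set.mem_ofList _ _).mpr hh)
        simp [hm, hx]
    rw [he, filter_mem_sublist hsub hnd]
  -- B's buckets, via the one-pass invariant
  have hconv : (d.keys.foldl (fun st name =>
          (PySem.Set.ofList (d.getD name [])).foldl (fun st gene =>
            if PySem.Set.contains st.2 gene then st
            else
              (st.1.modify (d.keys.filter (fun n => PySem.Set.contains (PySem.Set.ofList (d.getD n [])) gene))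
                 PySem.Set.empty (fun s => PySem.Set.add s gene),
               PySem.Set.add st.2 gene)) st)
          (PySem.Dict.empty, PySem.Set.empty))
      = bucketsFold (fun gene => d.keys.filter (fun n => PySem.Set.contains (PySem.Set.ofList (d.getD n [])) gene))
          (d.keys.flatMap (fun n => PySem.Set.ofList (d.getD n [])))
          (PySem.Dict.empty, PySem.Set.empty) := by
    rw [bucketsFold, List.foldl_flatMap]
    rfl
  have hB := (bucketsFold_spec
      (fun gene => d.keys.filter (fun n => PySem.Set.contains (PySem.Set.ofList (d.getD n [])) gene))
      (d.keys.flatMap (fun n => PySem.Set.ofList (d.getD n [])))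
      PySem.Dict.empty PySem.Set.empty (fun c => rfl)).2 (c0 :: cs)
  rw [PySem.Set.update_empty] at hB
  show _ = ((d.keys.foldl _ (PySem.Dict.empty, PySem.Set.empty)).1).getD (c0 :: cs) PySem.Set.empty
  rw [hconv, hB]
  -- the carrier of B's bucket is A's first set
  have hcarrier : (PySem.Set.ofList (d.keys.flatMap (fun n => PySem.Set.ofList (d.getD n [])))).filter
        (fun g => d.keys.filter (fun n => PySem.Set.contains (PySem.Set.ofList (d.getD n [])) g) == c0 :: cs)
      = (PySem.Set.ofList (d.getD c0 [])).filter
        (fun g => d.keys.filter (fun n => PySem.Set.contains (PySem.Set.ofList (d.getD n [])) g) == c0 :: cs) := by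
    obtain ⟨pre, post, hsplit, hcs⟩ := cons_sublist_split hsub
    have hnd' := hnd
    rw [hsplit] at hnd'
    have hdisj : ∀ a, a ∈ pre → a ∈ c0 :: post → False :=
      fun a ha hb => (List.nodup_append.mp hnd').2.2 a ha a hb rfl
    rw [hsplit]
    apply ofList_flatMap_filter
    · exact PySem.Set.nodup_ofList _
    · intro g hq n hn
      have hsg0 := eq_of_beq hq
      rw [← hsplit] at hsg0
      have hsg : d.keys.filter (fun n => PySem.Set.contains (PySem.Set.ofList (d.getD n [])) g) = c0 :: cs := hsg0
      have hnk : n ∈ d.keys := by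
        rw [hsplit]; exact List.mem_append_left _ hn
      have hnc : n ∉ c0 :: cs := by
        intro hmem
        rcases List.mem_cons.mp hmem with rfl | hmem'
        · exact hdisj _ hn (List.mem_cons_self ..)
        · exact hdisj _ hn (List.mem_cons_of_mem _ (hcs.subset hmem'))
      exact (dir2 g hsg).2 n hnk hnc
    · intro g hq
      have hsg0 := eq_of_beq hq
      rw [← hsplit] at hsg0
      have hsg : d.keys.filter (fun n => PySem.Set.contains (PySem.Set.ofList (d.getD n [])) g) = c0 :: cs := hsg0
      exact (dir2 g hsg).1 c0 (List.mem_cons_self ..)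
  rw [hcarrier]
  -- A's value: reduce the matches and compare pointwise
  simp only [List.map_cons]
  cases holist : d.keys.filter (fun name => decide (name ∉ c0 :: cs)) with
  | nil =>
    simp only [List.map_nil]
    rw [foldl_inter_eq_filter]
    apply List.filter_congr
    intro g hg
    have hvac : ∀ n ∈ d.keys, n ∉ c0 :: cs → False := by
      intro n hn hnc
      have hmem : n ∈ d.keys.filter (fun name => decide (name ∉ c0 :: cs)) :=
        List.mem_filter.mpr ⟨hn, by simpa using hnc⟩
      rw [holist] at hmem
      simp at hmem
    cases hq : (d.keys.filter (fun n => PySem.Set.contains (PySem.Set.ofList (d.getD n [])) g) == c0 :: cs) with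
    | false =>
      cases hl : (cs.map (fun name => PySem.Set.ofList (d.getD name []))).all (fun t => PySem.Set.contains t g) with
      | false => rfl
      | true =>
        exfalso
        have h1 : ∀ n ∈ c0 :: cs, g ∈ PySem.Set.ofList (d.getD n []) := by
          intro n hn
          rcases List.mem_cons.mp hn with rfl | hn'
          · exact hg
          · exact (hmemS n g).mp (List.all_eq_true.mp hl _ (List.mem_map.mpr ⟨n, hn', rfl⟩))
        have hsg := dir1 g h1 (fun n hn hnc _ => hvac n hn hnc)
        rw [hsg] at hq
        simp at hq
    | true =>
      have hsg : d.keys.filter (fun n => PySem.Set.contains (PySem.Set.ofList (d.getD n [])) g) = c0 :: cs :=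
        eq_of_beq hq
      apply List.all_eq_true.mpr
      intro t ht
      obtain ⟨n, hn, rfl⟩ := List.mem_map.mp ht
      exact (hmemS n g).mpr ((dir2 g hsg).1 n (List.mem_cons_of_mem _ hn))
  | cons o os =>
    simp only [List.map_cons]
    rw [foldl_inter_eq_filter]
    rw [show ∀ (s t : PySem.Set String), PySem.Set.diff s t = s.filter (fun x => !PySem.Set.contains t x)
        from fun s t => rfl]
    rw [List.filter_filter]
    have hoin : ∀ n, n ∈ o :: os → n ∈ d.keys ∧ n ∉ c0 :: cs := by
      intro n hn
      rw [← holist] at hn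
      obtain ⟨hk, hdec⟩ := List.mem_filter.mp hn
      exact ⟨hk, by simpa using hdec⟩
    have hocov : ∀ n, n ∈ d.keys → n ∉ c0 :: cs → n ∈ o :: os := by
      intro n hn hnc
      rw [← holist]
      exact List.mem_filter.mpr ⟨hn, by simpa using hnc⟩
    have hUmem : ∀ g : String,
        g ∈ (os.map (fun name => PySem.Set.ofList (d.getD name []))).foldl
            (fun a b => PySem.Set.union a b) (PySem.Set.ofList (d.getD o []))
        ↔ ∃ n ∈ o :: os, g ∈ PySem.Set.ofList (d.getD n []) := by
      intro g
      rw [mem_foldl_union]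
      constructor
      · rintro (h | ⟨t, ht, hgt⟩)
        · exact ⟨o, List.mem_cons_self .., h⟩
        · obtain ⟨n, hn, rfl⟩ := List.mem_map.mp ht
          exact ⟨n, List.mem_cons_of_mem _ hn, hgt⟩
      · rintro ⟨n, hn, hgn⟩
        rcases List.mem_cons.mp hn with rfl | hn'
        · exact Or.inl hgn
        · exact Or.inr ⟨_, List.mem_map.mpr ⟨n, hn', rfl⟩, hgn⟩
    apply List.filter_congr
    intro g hg
    cases hq : (d.keys.filter (fun n => PySem.Set.contains (PySem.Set.ofList (d.getD n [])) g) == c0 :: cs) with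
    | true =>
      have hsg : d.keys.filter (fun n => PySem.Set.contains (PySem.Set.ofList (d.getD n [])) g) = c0 :: cs :=
        eq_of_beq hq
      obtain ⟨h1, h2⟩ := dir2 g hsg
      have hA1 : (cs.map (fun name => PySem.Set.ofList (d.getD name []))).all (fun t => PySem.Set.contains t g) = true := by
        apply List.all_eq_true.mpr
        intro t ht
        obtain ⟨n, hn, rfl⟩ := List.mem_map.mp ht
        exact (hmemS n g).mpr (h1 n (List.mem_cons_of_mem _ hn))
      have hA2 : (!PySem.Set.contains ((os.map (fun name => PySem.Set.ofList (d.getD name []))).foldl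
            (fun a b => PySem.Set.union a b) (PySem.Set.ofList (d.getD o []))) g) = true := by
        rw [Bool.not_eq_eq_eq_not, Bool.not_true]
        cases hcg : PySem.Set.contains ((os.map (fun name => PySem.Set.ofList (d.getD name []))).foldl
            (fun a b => PySem.Set.union a b) (PySem.Set.ofList (d.getD o []))) g
        · rfl
        · exfalso
          have hmem := (PySem.Set.contains_iff _ _).mp hcg
          obtain ⟨n, hn, hgn⟩ := (hUmem g).mp hmem
          obtain ⟨hnk, hnc⟩ := hoin n hn
          exact h2 n hnk hnc hgn
      rw [Bool.and_eq_true]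
      first
      | exact ⟨hA1, hA2⟩
      | exact ⟨hA2, hA1⟩
    | false =>
      cases hl : ((cs.map (fun name => PySem.Set.ofList (d.getD name []))).all (fun t => PySem.Set.contains t g) &&
          !PySem.Set.contains ((os.map (fun name => PySem.Set.ofList (d.getD name []))).foldl
            (fun a b => PySem.Set.union a b) (PySem.Set.ofList (d.getD o []))) g) with
      | false =>
        first
        | exact hl
        | (rw [← hl, Bool.and_comm])
      | true =>
        exfalso
        rw [Bool.and_eq_true] at hl
        obtain ⟨hp, hq0⟩ := hl
        have h1 : ∀ n ∈ c0 :: cs, g ∈ PySem.Set.ofList (d.getD n []) := by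
          intro n hn
          rcases List.mem_cons.mp hn with rfl | hn'
          · exact hg
          · exact (hmemS n g).mp (List.all_eq_true.mp hp _ (List.mem_map.mpr ⟨n, hn', rfl⟩))
        have h2 : ∀ n ∈ d.keys, n ∉ c0 :: cs → g ∉ PySem.Set.ofList (d.getD n []) := by
          intro n hn hnc hgn
          have hUfalse : PySem.Set.contains ((os.map (fun name => PySem.Set.ofList (d.getD name []))).foldl
              (fun a b => PySem.Set.union a b) (PySem.Set.ofList (d.getD o []))) g = false := by
            rw [Bool.not_eq_eq_eq_not, Bool.not_true] at hq0
            exact hq0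
          have hmem : g ∈ (os.map (fun name => PySem.Set.ofList (d.getD name []))).foldl
              (fun a b => PySem.Set.union a b) (PySem.Set.ofList (d.getD o [])) :=
            (hUmem g).mpr ⟨n, hocov n hn hnc, hgn⟩
          rw [(PySem.Set.contains_iff _ _).mpr hmem] at hUfalse
          cases hUfalse
        have hsg := dir1 g h1 h2
        rw [hsg] at hq
        simp at hq

-- the bodies of the two ports, for any dict with Nodup keys
lemma bodies_eq (d : PySem.Dict String (List String)) (hnd : d.keys.Nodup) :
    (PySem.List.pyRange 1 ((d.keys.length : Int) + 1) 1).foldl (fun overlaps r =>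
      (pyCombinations r.toNat d.keys).foldl (fun overlaps combo =>
        let intersection : PySem.Set String :=
          match combo.map (fun name => PySem.Set.ofList (d.getD name [])) with
          | [] => []
          | s :: rest => rest.foldl (fun a b => PySem.Set.inter a b) s
        let exclusive : PySem.Set String :=
          match (d.keys.filter (fun name => decide (name ∉ combo))).map
              (fun name => PySem.Set.ofList (d.getD name [])) with
          | [] => intersection
          | s :: rest => PySem.Set.diff intersection (rest.foldl (fun a b => PySem.Set.union a b) s)
        overlaps ++ [(combo, exclusive)]) overlaps) []
    = (PySem.List.pyRange 1 ((d.keys.length : Int) + 1) 1).foldl (fun overlaps r =>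
      (pyCombinations r.toNat d.keys).foldl (fun overlaps combo =>
        overlaps ++ [(combo,
          ((d.keys.foldl (fun st name =>
              (PySem.Set.ofList (d.getD name [])).foldl (fun st gene =>
                if PySem.Set.contains st.2 gene then st
                else
                  (st.1.modify (d.keys.filter (fun n => PySem.Set.contains (PySem.Set.ofList (d.getD n [])) gene))
                     PySem.Set.empty (fun s => PySem.Set.add s gene),
                   PySem.Set.add st.2 gene)) st)
              (PySem.Dict.empty, PySem.Set.empty)).1).getD combo PySem.Set.empty)]) overlaps) [] := by
  apply PySem.List.foldl_congr_mem
  intro acc r hr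
  apply PySem.List.foldl_congr_mem
  intro acc2 combo hcombo
  obtain ⟨hsub, hlen⟩ := mem_pyCombinations r.toNat d.keys combo hcombo
  have hr1 : 1 ≤ r := (PySem.List.mem_pyRange_one.mp hr).1
  cases combo with
  | nil =>
    exfalso
    rw [List.length_nil] at hlen
    omega
  | cons c0 cs =>
    exact congrArg (fun v => acc2 ++ [((c0 :: cs : List String), v)])
      (combo_value_eq d hnd c0 cs hsub)

theorem ports_eq (deg_sets : List (String × List String)) :
    compute_overlaps deg_sets = compute_overlaps_alt deg_sets := by
  unfold compute_overlaps compute_overlaps_alt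
  exact bodies_eq (PySem.Dict.ofList deg_sets) (PySem.Dict.nodup_keys_ofList deg_sets)

-- ===== VERDICT (by name: the statement is the Claim_ definition above) =====
theorem compute_overlaps_spec : Claim_equal_compute_overlaps := by
  intro deg_sets _
  unfold Spec_compute_overlaps
  exact ports_eq deg_sets
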